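-- pv_equiv track=rewrite | github.com/RokyB3/TGNEncoding | hospital/hospital_ground_truth.py | time_steps_most_connected
-- ===== SOURCE A (Python) =====
-- def time_steps_most_connected(tgn):
--     max_connections = 0
--     best_times = []
--     for t, snapshot in enumerate(tgn):
--         edge_count = len(snapshot["edges"])
--         if edge_count > max_connections:
--             max_connections = edge_count
--             best_times = [t]
--         elif edge_count == max_connections:
--             best_times.append(t)
--     return best_times
-- ===== SOURCE B (Python) =====
-- def time_steps_most_connected(tgn):
--     counts = [len(snapshot["edges"]) for snapshot in tgn]
--     if not counts:
--         return []
--     m = max(counts)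
--     return [t for t, c in enumerate(counts) if c == m]
-- ===== Notes on version B (the rewrite author's own statement) =====
-- stated objective: simpler
-- what changed: Replaces the interleaved running-max loop with reset/append bookkeeping by a build-counts-then-max-then-filter decomposition (three plain passes, no mutable best-list state).
import Mathlib
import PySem

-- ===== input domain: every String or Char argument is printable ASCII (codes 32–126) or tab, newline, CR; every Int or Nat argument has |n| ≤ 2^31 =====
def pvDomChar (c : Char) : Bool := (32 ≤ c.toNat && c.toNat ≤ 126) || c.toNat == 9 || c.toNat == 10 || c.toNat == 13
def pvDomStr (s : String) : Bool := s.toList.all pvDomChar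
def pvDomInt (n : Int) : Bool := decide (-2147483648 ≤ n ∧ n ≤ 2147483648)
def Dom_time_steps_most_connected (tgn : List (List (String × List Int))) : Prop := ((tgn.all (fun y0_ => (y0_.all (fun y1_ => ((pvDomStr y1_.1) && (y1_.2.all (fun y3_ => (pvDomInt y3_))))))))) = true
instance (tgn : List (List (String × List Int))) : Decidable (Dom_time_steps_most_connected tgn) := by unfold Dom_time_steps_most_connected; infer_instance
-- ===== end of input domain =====

-- ===== PORT A =====
-- B changes: counts-list + max + filter decomposition instead of A's running-max loop; objective: simpler.
-- A's loop over enumerate(tgn) with running max and best-times accumulator (literal transliteration).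
def tsmcLoop (rest : List (List (String × List Int))) (t : Int) (maxc : Int) (best : List Int) : List Int :=
  match rest with
  | [] => best
  | s :: rest' =>
    let c : Int := ((PySem.Dict.mk s).getD "edges" []).length
    if c > maxc then tsmcLoop rest' (t + 1) c [t]
    else if c = maxc then tsmcLoop rest' (t + 1) maxc (best ++ [t])
    else tsmcLoop rest' (t + 1) maxc best

def time_steps_most_connected (tgn : List (List (String × List Int))) : List Int :=
  tsmcLoop tgn 0 0 []

-- ===== PORT B =====
def time_steps_most_connected_alt (tgn : List (List (String × List Int))) : List Int :=
  let counts : List Int := tgn.map (fun s => (((PySem.Dict.mk s).getD "edges" []).length : Int))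
  if counts.isEmpty then []
  else
    let m := (PySem.List.max? counts (fun c => c)).getD 0
    (PySem.List.enumerate counts 0).filterMap (fun p => if p.2 = m then some p.1 else none)

-- ===== PRECONDITION & SPEC =====
-- Pre_ excludes exactly the inputs where some snapshot lacks the key "edges": there Python A raises KeyError.
def Pre_time_steps_most_connected (tgn : List (List (String × List Int))) : Prop :=
  (tgn.all (fun s => (PySem.Dict.mk s).contains "edges")) = true
instance (tgn : List (List (String × List Int))) : Decidable (Pre_time_steps_most_connected tgn) := by
  unfold Pre_time_steps_most_connected; infer_instance

def pvWitness_time_steps_most_connected : (List (List (String × List Int))) :=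
  [[("edges", [1, 2])], [("edges", [3])]]

def Spec_time_steps_most_connected (tgn : List (List (String × List Int))) (out : List Int) : Prop := out = time_steps_most_connected_alt tgn
instance (tgn : List (List (String × List Int))) (out : List Int) : Decidable (Spec_time_steps_most_connected tgn out) := by unfold Spec_time_steps_most_connected; infer_instance

-- ===== CLAIM (what is proved, stated in full; the proofs are below) =====
def Claim_equal_time_steps_most_connected : Prop := ∀ (tgn : List (List (String × List Int))), Dom_time_steps_most_connected tgn → Pre_time_steps_most_connected tgn → Spec_time_steps_most_connected tgn (time_steps_most_connected tgn)

-- ===== LEMMAS AND PROOFS =====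

-- indices (starting at t) of elements of cs equal to M
def idxEq (cs : List Int) (t : Int) (M : Int) : List Int :=
  match cs with
  | [] => []
  | c :: rest => (if c = M then [t] else []) ++ idxEq rest (t + 1) M

-- the counts of a tgn list
def tsmcCounts (tgn : List (List (String × List Int))) : List Int :=
  tgn.map (fun s => (((PySem.Dict.mk s).getD "edges" []).length : Int))

-- A's loop expressed over the list of counts
def countLoop (cs : List Int) (t : Int) (maxc : Int) (best : List Int) : List Int :=
  match cs with
  | [] => best
  | c :: rest =>
    if c > maxc then countLoop rest (t + 1) c [t]
    else if c = maxc then countLoop rest (t + 1) maxc (best ++ [t])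
    else countLoop rest (t + 1) maxc best

lemma tsmcLoop_eq_countLoop (tgn : List (List (String × List Int))) (t maxc : Int) (best : List Int) :
    tsmcLoop tgn t maxc best = countLoop (tsmcCounts tgn) t maxc best := by
  induction tgn generalizing t maxc best with
  | nil => rfl
  | cons s rest ih =>
    rw [tsmcLoop, tsmcCounts, List.map_cons, countLoop]
    split_ifs <;> simp [ih, tsmcCounts]

lemma le_foldl_max' (cs : List Int) (m : Int) : m ≤ cs.foldl max m := by
  induction cs generalizing m with
  | nil => exact le_rfl
  | cons c rest ih => exact le_trans (le_max_left m c) (ih (max m c))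

lemma countLoop_eq_closed (cs : List Int) (t maxc : Int) (best : List Int) :
    countLoop cs t maxc best =
      (if cs.foldl max maxc = maxc then best else []) ++ idxEq cs t (cs.foldl max maxc) := by
  induction cs generalizing t maxc best with
  | nil => simp [countLoop, idxEq]
  | cons c rest ih =>
    rw [countLoop, List.foldl_cons, idxEq]
    by_cases h1 : c > maxc
    · have hmc : max maxc c = c := max_eq_right (le_of_lt h1)
      rw [if_pos h1, ih, hmc]
      have hMc := le_foldl_max' rest c
      have hne : rest.foldl max c ≠ maxc := by omega
      rw [if_neg hne]
      by_cases h2 : rest.foldl max c = c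
      · simp [h2]
      · have : ¬ (c = rest.foldl max c) := fun he => h2 he.symm
        simp [h2, this]
    · have hmc : max maxc c = maxc := max_eq_left (le_of_not_gt h1)
      rw [if_neg h1, hmc]
      by_cases h2 : c = maxc
      · rw [if_pos h2, ih]
        by_cases h3 : rest.foldl max maxc = maxc
        · simp [h3, h2]
        · have : ¬ (c = rest.foldl max maxc) := by
            subst h2; exact fun he => h3 he.symm
          simp [h3, this]
      · rw [if_neg h2, ih]
        have hlt : c < maxc := lt_of_le_of_ne (le_of_not_gt h1) h2
        have hMc := le_foldl_max' rest maxc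
        have : ¬ (c = rest.foldl max maxc) := by omega
        simp [this]

lemma filterMap_enumerate_eq_idxEq (cs : List Int) (t M : Int) :
    (PySem.List.enumerate cs t).filterMap (fun p => if p.2 = M then some p.1 else none) =
      idxEq cs t M := by
  induction cs generalizing t with
  | nil => simp [idxEq, PySem.List.enumerate_nil]
  | cons c rest ih =>
    rw [PySem.List.enumerate_cons, List.filterMap_cons, idxEq]
    by_cases h : c = M <;> simp [h, ih]

lemma counts_nonneg (tgn : List (List (String × List Int))) :
    ∀ c ∈ tsmcCounts tgn, 0 ≤ c := by
  intro c hc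
  simp only [tsmcCounts, List.mem_map] at hc
  obtain ⟨s, _, rfl⟩ := hc
  exact Int.natCast_nonneg _

-- ===== VERDICT (by name: the statement is the Claim_ definition above) =====
theorem time_steps_most_connected_spec : Claim_equal_time_steps_most_connected := by
  intro tgn _ _
  unfold Spec_time_steps_most_connected time_steps_most_connected time_steps_most_connected_alt
  rw [tsmcLoop_eq_countLoop, countLoop_eq_closed]
  show _ = (if (tsmcCounts tgn).isEmpty then [] else _)
  cases htgn : tsmcCounts tgn with
  | nil =>
    simp [idxEq]
  | cons c rest =>
    have hc0 : (0 : Int) ≤ c := counts_nonneg tgn c (by rw [htgn]; simp)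
    have hfold : List.foldl max 0 (c :: rest) = rest.foldl max c := by
      simp [List.foldl, max_eq_right hc0]
    rw [hfold]
    simp only [List.isEmpty_cons, Bool.false_eq_true, if_false,
      filterMap_enumerate_eq_idxEq]
    have : idxEq (tsmcCounts tgn) 0 ((PySem.List.max? (tsmcCounts tgn) (fun c => c)).getD 0)
        = idxEq (c :: rest) 0 (rest.foldl max c) := by
      rw [htgn, PySem.List.max?_id_cons]; rfl
    rw [show (List.map (fun s => (((PySem.Dict.mk s).getD "edges" []).length : Int)) tgn)
        = tsmcCounts tgn from rfl, this]
    split <;> rfl
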